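-- pv_equiv track=rewrite | github.com/JCassiere/ccsubsample | ccsubsample/subsampling/subsampling.py | find_keep_remove_pairs
-- ===== SOURCE A (Python) =====
-- def find_keep_remove_pairs(removal_candidate_indices_with_neighbor):
--     """
--     Find pairs of nearest neighbors where one of the points should be removed
--
--     :param removal_candidate_indices_with_neighbor:
--     :return: keep_remove_pairs: List[(int, int)] - a list of pairs of indices, where the first
--         in each pair represents the index of a nearest neighbor to keep, and the second represents
--         the index of a nearest neighbor to remove
--     """
--     # Go through the list of removal candidates paired with their neighbors
--     # Mark each neighbor for removal. While going through the list, do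
--     # not check any point that has already been marked for removal
--     # (i.e. any point that was the nearest neighbor for an already-
--     # checked point)
--     candidates = {}
--     keep_remove_pairs = []
--     for point, neighbor in removal_candidate_indices_with_neighbor:
--         # the nearest neighbor search algorithm is approximate and not exact
--         # so you can't count on the algorithm finding both a point and its neighbor
--         # to have a nearest neighbor less than the cutoff
--         # so mark them both as deletion candidates here
--         # otherwise the loop below could error
--         candidates[point] = True
--         candidates[neighbor] = True
--
--     for point, neighbor in removal_candidate_indices_with_neighbor:
--         if candidates[point] and candidates[neighbor]:
--             keep_remove_pairs.append((point, neighbor))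
--             candidates[neighbor] = False
--
--     return keep_remove_pairs
-- ===== SOURCE B (Python) =====
-- def find_keep_remove_pairs(removal_candidate_indices_with_neighbor):
--     # Sieve: always emit the first remaining pair, then delete from the rest
--     # every pair that mentions the just-removed neighbor. No removed-set or
--     # candidate table is ever maintained.
--     keep_remove_pairs = []
--     rest = list(removal_candidate_indices_with_neighbor)
--     while rest:
--         point, neighbor = rest[0]
--         keep_remove_pairs.append((point, neighbor))
--         rest = [(a, b) for (a, b) in rest[1:] if a != neighbor and b != neighbor]
--     return keep_remove_pairs
-- ===== Notes on version B (the rewrite author's own statement) =====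
-- stated objective: alternative
-- what changed: Replaces A's two stateful passes (build a point->bool candidate table, then scan it flipping neighbors to False) by a stateless sieve: repeatedly emit the first remaining pair and filter out of the rest every pair mentioning the removed neighbor.
import Mathlib
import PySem

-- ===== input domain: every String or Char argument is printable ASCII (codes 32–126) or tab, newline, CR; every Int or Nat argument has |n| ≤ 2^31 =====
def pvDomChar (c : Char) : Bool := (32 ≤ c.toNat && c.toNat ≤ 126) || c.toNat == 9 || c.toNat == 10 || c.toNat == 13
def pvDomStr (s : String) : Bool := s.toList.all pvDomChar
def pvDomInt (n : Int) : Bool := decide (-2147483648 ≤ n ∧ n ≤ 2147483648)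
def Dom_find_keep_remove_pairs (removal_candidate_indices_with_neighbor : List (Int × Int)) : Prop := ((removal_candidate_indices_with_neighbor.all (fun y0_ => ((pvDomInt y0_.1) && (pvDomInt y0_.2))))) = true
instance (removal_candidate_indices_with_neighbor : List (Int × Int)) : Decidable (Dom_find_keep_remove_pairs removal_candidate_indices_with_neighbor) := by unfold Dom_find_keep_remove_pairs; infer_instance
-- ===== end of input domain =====

-- B replaces A's two stateful passes (candidate table, then flip-to-False scan) by a
-- stateless sieve that repeatedly emits the head pair and filters the rest; objective: alternative.

-- ===== PORT A =====
-- candidates[point] / candidates[neighbor] in A's second loop never raise: the first loop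
-- inserted every point and neighbor as a key, so getD here is exact (never hits the default).
def find_keep_remove_pairs (removal_candidate_indices_with_neighbor : List (Int × Int)) : List (Int × Int) :=
  let candidates : PySem.Dict Int Bool :=
    removal_candidate_indices_with_neighbor.foldl
      (fun d pn => (d.insert pn.1 true).insert pn.2 true) PySem.Dict.empty
  (removal_candidate_indices_with_neighbor.foldl
    (fun (st : PySem.Dict Int Bool × List (Int × Int)) pn =>
      if st.1.getD pn.1 false && st.1.getD pn.2 false then
        (st.1.insert pn.2 false, st.2 ++ [(pn.1, pn.2)])
      else st)
    (candidates, [])).2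

-- ===== PORT B =====
-- the while loop of Source B: emit the head pair, filter the rest, loop on the (shorter) filtered rest
def pvSieve (rest : List (Int × Int)) (acc : List (Int × Int)) : List (Int × Int) :=
  match rest with
  | [] => acc
  | pn :: t =>
      pvSieve (t.filter (fun ab => ab.1 != pn.2 && ab.2 != pn.2)) (acc ++ [(pn.1, pn.2)])
termination_by rest.length
decreasing_by
  simp only [List.length_cons, List.length_unattach]
  exact Nat.lt_succ_of_le (le_trans (List.length_filter_le _ _) (by simp))

def find_keep_remove_pairs_alt (removal_candidate_indices_with_neighbor : List (Int × Int)) : List (Int × Int) :=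
  pvSieve removal_candidate_indices_with_neighbor []

-- ===== PRECONDITION & SPEC =====
def Spec_find_keep_remove_pairs (removal_candidate_indices_with_neighbor : List (Int × Int)) (out : List (Int × Int)) : Prop := out = find_keep_remove_pairs_alt removal_candidate_indices_with_neighbor
instance (removal_candidate_indices_with_neighbor : List (Int × Int)) (out : List (Int × Int)) : Decidable (Spec_find_keep_remove_pairs removal_candidate_indices_with_neighbor out) := by unfold Spec_find_keep_remove_pairs; infer_instance

-- ===== CLAIM (what is proved, stated in full; the proofs are below) =====
def Claim_equal_find_keep_remove_pairs : Prop := ∀ (removal_candidate_indices_with_neighbor : List (Int × Int)), Dom_find_keep_remove_pairs removal_candidate_indices_with_neighbor → Spec_find_keep_remove_pairs removal_candidate_indices_with_neighbor (find_keep_remove_pairs removal_candidate_indices_with_neighbor)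

-- ===== LEMMAS AND PROOFS =====

-- all points and neighbors of the list, in order
def pvPts (l : List (Int × Int)) : List Int := l.flatMap (fun pn => [pn.1, pn.2])

lemma pvPts_cons (pn : Int × Int) (l : List (Int × Int)) :
    pvPts (pn :: l) = pn.1 :: pn.2 :: pvPts l := rfl

-- building with value true preserves a true entry
lemma pv_build_preserve (l : List (Int × Int)) (d : PySem.Dict Int Bool) (x : Int)
    (h : d.getD x false = true) :
    (l.foldl (fun d pn => (d.insert pn.1 true).insert pn.2 true) d).getD x false = true := by
  induction l generalizing d with
  | nil => exact h
  | cons pn t ih =>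
    apply ih
    simp [PySem.Dict.getD_insert]
    tauto

-- every point/neighbor of l ends up mapped to true
lemma pv_build_true (l : List (Int × Int)) (d : PySem.Dict Int Bool) (x : Int)
    (hx : x ∈ pvPts l) :
    (l.foldl (fun d pn => (d.insert pn.1 true).insert pn.2 true) d).getD x false = true := by
  induction l generalizing d with
  | nil => simp [pvPts] at hx
  | cons pn t ih =>
    rw [pvPts_cons, List.mem_cons, List.mem_cons] at hx
    rw [List.foldl_cons]
    rcases hx with h | h | h
    · apply pv_build_preserve
      rw [h, PySem.Dict.getD_insert, PySem.Dict.getD_insert_self]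
      split_ifs <;> rfl
    · apply pv_build_preserve
      rw [h, PySem.Dict.getD_insert_self]
    · exact ih _ h

-- A's second loop agrees with a removed-set loop whenever the dict and the set are in sync
lemma pv_loop_eq (l : List (Int × Int)) (d : PySem.Dict Int Bool) (s : PySem.Set Int)
    (acc : List (Int × Int))
    (h : ∀ x, x ∈ pvPts l → d.getD x false = !(PySem.Set.contains s x)) :
    (l.foldl (fun (st : PySem.Dict Int Bool × List (Int × Int)) pn =>
        if st.1.getD pn.1 false && st.1.getD pn.2 false then
          (st.1.insert pn.2 false, st.2 ++ [(pn.1, pn.2)])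
        else st) (d, acc)).2
    = (l.foldl (fun (st : PySem.Set Int × List (Int × Int)) pn =>
        if !(PySem.Set.contains st.1 pn.1) && !(PySem.Set.contains st.1 pn.2) then
          (PySem.Set.add st.1 pn.2, st.2 ++ [(pn.1, pn.2)])
        else st) (s, acc)).2 := by
  induction l generalizing d s acc with
  | nil => rfl
  | cons pn t ih =>
    have hp : d.getD pn.1 false = !(PySem.Set.contains s pn.1) :=
      h pn.1 (by rw [pvPts_cons]; simp)
    have hn : d.getD pn.2 false = !(PySem.Set.contains s pn.2) :=
      h pn.2 (by rw [pvPts_cons]; simp)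
    simp only [List.foldl_cons, hp, hn]
    by_cases hc : (!(PySem.Set.contains s pn.1) && !(PySem.Set.contains s pn.2)) = true
    · rw [if_pos hc, if_pos hc]
      apply ih
      intro x hx
      have hxh := h x (by rw [pvPts_cons]; simp [hx])
      simp [PySem.Dict.getD_insert, PySem.Set.contains, PySem.Set.add] at *
      split_ifs with he <;> simp_all [Bool.and_comm]
    · rw [if_neg hc, if_neg hc]
      apply ih
      intro x hx
      exact h x (by rw [pvPts_cons]; simp [hx])

-- membership in an enlarged removed-set, pointwise
lemma pv_contains_add (s : PySem.Set Int) (y x : Int) :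
    PySem.Set.contains (PySem.Set.add s y) x = (PySem.Set.contains s x || x == y) := by
  simp [PySem.Set.contains, PySem.Set.add]
  split_ifs with h <;> simp_all [Bool.or_comm, beq_eq_decide]

-- the removed-set loop equals the sieve run on the list pre-filtered by the current set
lemma pv_setLoop_eq_sieve (l : List (Int × Int)) (s : PySem.Set Int) (acc : List (Int × Int)) :
    (l.foldl (fun (st : PySem.Set Int × List (Int × Int)) pn =>
        if !(PySem.Set.contains st.1 pn.1) && !(PySem.Set.contains st.1 pn.2) then
          (PySem.Set.add st.1 pn.2, st.2 ++ [(pn.1, pn.2)])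
        else st) (s, acc)).2
    = pvSieve (l.filter (fun ab => !(PySem.Set.contains s ab.1) && !(PySem.Set.contains s ab.2))) acc := by
  induction l generalizing s acc with
  | nil => simp [pvSieve]
  | cons pn t ih =>
    simp only [List.foldl_cons, List.filter_cons]
    by_cases hc : (!(PySem.Set.contains s pn.1) && !(PySem.Set.contains s pn.2)) = true
    · rw [if_pos hc, if_pos hc]
      rw [ih]
      rw [pvSieve]
      congr 1
      rw [List.filter_filter]
      apply List.filter_congr
      intro ab _
      simp only [pv_contains_add]
      cases hab1 : PySem.Set.contains s ab.1 <;> cases hab2 : PySem.Set.contains s ab.2 <;>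
        simp [bne, Bool.and_comm]
    · rw [if_neg hc, if_neg hc]
      exact ih s acc

-- ===== VERDICT (by name: the statement is the Claim_ definition above) =====
theorem find_keep_remove_pairs_spec : Claim_equal_find_keep_remove_pairs := by
  intro l _
  unfold Spec_find_keep_remove_pairs find_keep_remove_pairs find_keep_remove_pairs_alt
  rw [pv_loop_eq l _ PySem.Set.empty []
    (by intro x hx
        have := pv_build_true l PySem.Dict.empty x hx
        simp [PySem.Set.contains, PySem.Set.empty, this])]
  rw [pv_setLoop_eq_sieve]
  congr 1
  simp [PySem.Set.contains, PySem.Set.empty]
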